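-- pv_equiv track=rewrite | github.com/rycan88/Tetris-Game-and-Bot | Tetris_player.py | FindHeights
-- ===== SOURCE A (Python) =====
-- def FindHeights(board):
--     heights = []
--     for x in range(10):
--         for y in range(20):
--             if (x,y) in board:
--                 break
--             y+=1
--         heights.append(y)
--     return heights
-- ===== SOURCE B (Python) =====
-- def FindHeights(board):
--     heights = [20] * 10
--     for x, y in board:
--         if 0 <= x < 10 and 0 <= y < 20 and y < heights[x]:
--             heights[x] = y
--     return heights
-- ===== Notes on version B (the rewrite author's own statement) =====
-- stated objective: idiomatic
-- what changed: Replaces the per-column top-down scan (a fresh 'in board' membership test for each of the 200 grid cells) by a single pass over the board cells maintaining a min-table of column heights.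
import Mathlib
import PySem

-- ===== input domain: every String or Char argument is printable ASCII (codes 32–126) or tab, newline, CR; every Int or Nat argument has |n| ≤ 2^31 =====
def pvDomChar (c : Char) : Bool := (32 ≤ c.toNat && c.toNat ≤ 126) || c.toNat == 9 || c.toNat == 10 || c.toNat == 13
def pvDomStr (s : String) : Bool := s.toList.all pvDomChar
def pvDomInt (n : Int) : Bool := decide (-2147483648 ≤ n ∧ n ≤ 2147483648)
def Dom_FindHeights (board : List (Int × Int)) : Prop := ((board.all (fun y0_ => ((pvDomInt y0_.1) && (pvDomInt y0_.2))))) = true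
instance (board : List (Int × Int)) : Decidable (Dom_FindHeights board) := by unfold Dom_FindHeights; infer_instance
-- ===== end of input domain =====

-- B replaces A's per-column scan (a fresh 'in board' membership test for every (x,y) grid cell)
-- by one pass over the board cells that maintains a min-table of column heights (objective: faster one-pass algorithm).

-- ===== PORT A =====
-- inner 'for y in range(20)' loop: carries the running value of the Python variable y
def pvInnerA (board : List (Int × Int)) (x : Int) : List Int → Int → Int
  | [], y => y
  | yv :: rest, _ => if board.contains (x, yv) then yv else pvInnerA board x rest (yv + 1)

def FindHeights (board : List (Int × Int)) : List Int :=
  (PySem.List.pyRange 0 10 1).foldl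
    (fun heights x => heights ++ [pvInnerA board x (PySem.List.pyRange 0 20 1) 0]) []

-- ===== PORT B =====
def pvStepB (heights : List Int) (c : Int × Int) : List Int :=
  if 0 ≤ c.1 ∧ c.1 < 10 ∧ 0 ≤ c.2 ∧ c.2 < 20 ∧ c.2 < PySem.List.pyGetD heights c.1 0 then
    heights.set c.1.toNat c.2
  else heights

def FindHeights_alt (board : List (Int × Int)) : List Int :=
  board.foldl pvStepB (List.replicate 10 20)

-- ===== PRECONDITION & SPEC =====
def Spec_FindHeights (board : List (Int × Int)) (out : List Int) : Prop := out = FindHeights_alt board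
instance (board : List (Int × Int)) (out : List Int) : Decidable (Spec_FindHeights board out) := by unfold Spec_FindHeights; infer_instance

-- ===== CLAIM (what is proved, stated in full; the proofs are below) =====
def Claim_equal_FindHeights : Prop := ∀ (board : List (Int × Int)), Dom_FindHeights board → Spec_FindHeights board (FindHeights board)

-- ===== LEMMAS AND PROOFS =====

-- r is the least occupied row (within the 0..19 window) of column x, or 20 if the column is empty
def ColOK (board : List (Int × Int)) (x r : Int) : Prop :=
  (r = 20 ∨ ((x, r) ∈ board ∧ 0 ≤ r ∧ r < 20)) ∧
  (∀ y, (x, y) ∈ board → 0 ≤ y → y < 20 → r ≤ y)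

theorem ColOK_uniq {board : List (Int × Int)} {x r1 r2 : Int}
    (h1 : ColOK board x r1) (h2 : ColOK board x r2) : r1 = r2 := by
  obtain ⟨m1, lb1⟩ := h1
  obtain ⟨m2, lb2⟩ := h2
  rcases m1 with h1e | ⟨h1m, h1a, h1b⟩ <;> rcases m2 with h2e | ⟨h2m, h2a, h2b⟩
  · omega
  · have := lb1 r2 h2m h2a h2b; omega
  · have := lb2 r1 h1m h1a h1b; omega
  · have := lb1 r2 h2m h2a h2b; have := lb2 r1 h1m h1a h1b; omega

theorem innerA_colOK (board : List (Int × Int)) (x : Int) :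
    ∀ (k : Int), 0 ≤ k → k ≤ 20 →
    (∀ y, (x, y) ∈ board → 0 ≤ y → y < k → False) →
    ColOK board x (pvInnerA board x (PySem.List.pyRange k 20 1) k) := by
  intro k hk0 hk20 hinv
  induction hfuel : (20 - k).toNat generalizing k with
  | zero =>
    have hk : k = 20 := by omega
    subst hk
    rw [PySem.List.pyRange_one_eq_nil (by omega)]
    simp only [pvInnerA]
    exact ⟨Or.inl rfl, fun y hy h0 h20 => absurd (hinv y hy h0 (by omega)) (by simp)⟩
  | succ n ih =>
    have hklt : k < 20 := by omega
    rw [PySem.List.pyRange_one_cons (by omega)]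
    simp only [pvInnerA]
    by_cases hmem : board.contains (x, k)
    · rw [if_pos hmem]
      have hmem' : (x, k) ∈ board := by simpa using hmem
      exact ⟨Or.inr ⟨hmem', hk0, hklt⟩, fun y hy h0 h20 => by
        by_cases hlt : y < k
        · exact absurd (hinv y hy h0 hlt) (by simp)
        · omega⟩
    · rw [if_neg hmem]
      have hmem' : ¬ (x, k) ∈ board := by simpa using hmem
      have hinv' : ∀ y, (x, y) ∈ board → 0 ≤ y → y < k + 1 → False := by
        intro y hy h0 hlt
        by_cases h : y = k
        · exact hmem' (h ▸ hy)
        · exact hinv y hy h0 (by omega)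
      exact ih (k + 1) (by omega) (by omega) hinv' (by omega)

-- the per-column value B's fold computes, as a scalar fold over the board
def colFold (x : Int) (bs : List (Int × Int)) (v : Int) : Int :=
  bs.foldl (fun v c => if c.1 = x ∧ 0 ≤ c.2 ∧ c.2 < 20 ∧ c.2 < v then c.2 else v) v

theorem colFold_nil (x v : Int) : colFold x [] v = v := rfl

theorem colFold_cons (x : Int) (c : Int × Int) (bs : List (Int × Int)) (v : Int) :
    colFold x (c :: bs) v = colFold x bs (if c.1 = x ∧ 0 ≤ c.2 ∧ c.2 < 20 ∧ c.2 < v then c.2 else v) := rfl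

theorem colFold_spec (x : Int) :
    ∀ (bs : List (Int × Int)) (v : Int),
    (colFold x bs v = v ∨ ((x, colFold x bs v) ∈ bs ∧ 0 ≤ colFold x bs v ∧ colFold x bs v < 20)) ∧
    colFold x bs v ≤ v ∧
    (∀ y, (x, y) ∈ bs → 0 ≤ y → y < 20 → colFold x bs v ≤ y) := by
  intro bs
  induction bs with
  | nil => intro v; simp [colFold_nil]
  | cons c bs ih =>
    intro v
    rw [colFold_cons]
    by_cases hc : c.1 = x ∧ 0 ≤ c.2 ∧ c.2 < 20 ∧ c.2 < v
    · rw [if_pos hc]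
      obtain ⟨hmem, hle, hlb⟩ := ih c.2
      obtain ⟨hx, h2a, h2b, h2c⟩ := hc
      refine ⟨?_, by omega, ?_⟩
      · rcases hmem with h | ⟨h1, h2, h3⟩
        · right
          refine ⟨?_, by omega, by omega⟩
          rw [h]
          exact List.mem_cons.mpr (Or.inl (by cases c; simp_all))
        · exact Or.inr ⟨List.mem_cons_of_mem _ h1, h2, h3⟩
      · intro y hy h0 h20
        rcases List.mem_cons.mp hy with h | h
        · have hy2 : y = c.2 := congrArg Prod.snd h
          omega
        · exact hlb y h h0 h20
    · rw [if_neg hc]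
      obtain ⟨hmem, hle, hlb⟩ := ih v
      refine ⟨?_, hle, ?_⟩
      · rcases hmem with h | ⟨h1, h2, h3⟩
        · exact Or.inl h
        · exact Or.inr ⟨List.mem_cons_of_mem _ h1, h2, h3⟩
      · intro y hy h0 h20
        rcases List.mem_cons.mp hy with h | h
        · have hx : c.1 = x := congrArg Prod.fst h.symm
          have hy2 : c.2 = y := congrArg Prod.snd h.symm
          have : ¬ c.2 < v := fun hlt => hc ⟨hx, by omega, by omega, hlt⟩
          omega
        · exact hlb y h h0 h20

theorem colFold_colOK (board : List (Int × Int)) (x : Int) : ColOK board x (colFold x board 20) := by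
  obtain ⟨hmem, -, hlb⟩ := colFold_spec x board 20
  exact ⟨by rcases hmem with h | h; exacts [Or.inl h, Or.inr h], hlb⟩

theorem foldB_length : ∀ (bs : List (Int × Int)) (h : List Int),
    (bs.foldl pvStepB h).length = h.length := by
  intro bs
  induction bs with
  | nil => intro h; rfl
  | cons c bs ih =>
    intro h
    rw [List.foldl_cons, ih]
    unfold pvStepB
    split <;> simp

theorem foldB_getD (i : Nat) (hi : i < 10) :
    ∀ (bs : List (Int × Int)) (h : List Int), h.length = 10 →
    (bs.foldl pvStepB h).getD i 0 = colFold (i : Int) bs (h.getD i 0) := by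
  intro bs
  induction bs with
  | nil => intro h _; simp [colFold_nil]
  | cons c bs ih =>
    intro h hlen
    rw [List.foldl_cons, colFold_cons]
    by_cases hc : 0 ≤ c.1 ∧ c.1 < 10 ∧ 0 ≤ c.2 ∧ c.2 < 20 ∧ c.2 < PySem.List.pyGetD h c.1 0
    · have hstep : pvStepB h c = h.set c.1.toNat c.2 := by unfold pvStepB; rw [if_pos hc]
      have hgd : PySem.List.pyGetD h c.1 0 = h.getD c.1.toNat 0 :=
        PySem.List.pyGetD_of_nonneg h 0 hc.1
      rw [hstep, ih _ (by simpa using hlen)]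
      by_cases hx : c.1 = (i : Int)
      · have hnat : c.1.toNat = i := by omega
        have hcond : c.1 = (i : Int) ∧ 0 ≤ c.2 ∧ c.2 < 20 ∧ c.2 < h.getD i 0 := by
          refine ⟨hx, hc.2.2.1, hc.2.2.2.1, ?_⟩
          have h5 := hc.2.2.2.2
          rw [hgd, hnat] at h5
          exact h5
        rw [if_pos hcond]
        congr 1
        rw [← hnat]
        have hlt : c.1.toNat < h.length := by omega
        rw [List.getD_eq_getElem?_getD, List.getElem?_set_self hlt]
        rfl
      · have hcond : ¬ (c.1 = (i : Int) ∧ 0 ≤ c.2 ∧ c.2 < 20 ∧ c.2 < h.getD i 0) := fun hh => hx hh.1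
        rw [if_neg hcond]
        congr 1
        have hne : c.1.toNat ≠ i := by omega
        rw [List.getD_eq_getElem?_getD, List.getElem?_set_ne hne, ← List.getD_eq_getElem?_getD]
    · have hstep : pvStepB h c = h := by unfold pvStepB; rw [if_neg hc]
      rw [hstep, ih _ hlen]
      have hcond : ¬ (c.1 = (i : Int) ∧ 0 ≤ c.2 ∧ c.2 < 20 ∧ c.2 < h.getD i 0) := by
        intro hh
        apply hc
        refine ⟨by omega, by omega, hh.2.1, hh.2.2.1, ?_⟩
        rw [PySem.List.pyGetD_of_nonneg h 0 (by omega)]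
        have hnat : c.1.toNat = i := by omega
        rw [hnat]
        exact hh.2.2.2
      rw [if_neg hcond]

theorem foldl_append_map {α β : Type} (g : α → β) :
    ∀ (l : List α) (init : List β),
    l.foldl (fun acc x => acc ++ [g x]) init = init ++ l.map g := by
  intro l
  induction l with
  | nil => intro init; simp
  | cons x l ih => intro init; simp [ih]

theorem FindHeights_eq_map (board : List (Int × Int)) :
    FindHeights board = (PySem.List.pyRange 0 10 1).map
      (fun x => pvInnerA board x (PySem.List.pyRange 0 20 1) 0) := by
  unfold FindHeights
  rw [foldl_append_map]
  simp

-- ===== VERDICT (by name: the statement is the Claim_ definition above) =====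
theorem FindHeights_spec : Claim_equal_FindHeights := by
  intro board _
  unfold Spec_FindHeights FindHeights_alt
  rw [FindHeights_eq_map]
  have hlenB : (board.foldl pvStepB (List.replicate 10 20)).length = 10 := by
    rw [foldB_length]; rfl
  apply List.ext_getElem
  · rw [List.length_map, PySem.List.length_pyRange_one, hlenB]; rfl
  · intro i h1 h2
    have hi : i < 10 := by rw [hlenB] at h2; exact h2
    rw [List.getElem_map, PySem.List.getElem_pyRange_one]
    have hA : ColOK board ((0 : Int) + i) (pvInnerA board ((0:Int) + i) (PySem.List.pyRange 0 20 1) 0) := by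
      have := innerA_colOK board ((0:Int) + i) 0 (by omega) (by omega)
        (fun y _ h0 hlt => by omega)
      exact this
    have hB : (board.foldl pvStepB (List.replicate 10 20))[i] = colFold (i : Int) board 20 := by
      have hg := foldB_getD i hi board (List.replicate 10 20) (by simp)
      have hrep : (List.replicate 10 (20:Int)).getD i 0 = 20 := by
        rw [List.getD_eq_getElem?_getD, List.getElem?_replicate]
        simp [hi]
      rw [hrep] at hg
      rw [← hg, List.getD_eq_getElem?_getD, List.getElem?_eq_getElem h2]
      rfl
    rw [hB]
    have hB' : ColOK board ((0:Int) + i) (colFold ((0:Int) + i) board 20) := by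
      have := colFold_colOK board ((0:Int) + i)
      exact this
    have heq := ColOK_uniq hA hB'
    rw [heq]
    congr 1
    omega
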